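-- pv_equiv track=rewrite | github.com/yichunlo/Cryptography-and-Network-Security | hw1/hw1_b07902127/code5.py | val_to_string
-- ===== SOURCE A (Python) =====
-- def val_to_string(target):
-- 	flag = ""
-- 	bi = [1, 2, 4, 8, 16, 32, 64, 128]
-- 	counter = 0
-- 	c = 0
-- 	while target != 0:
-- 		c += (target % 2) * bi[counter]
-- 		counter += 1
-- 		target //= 2
-- 		if counter == 8:
-- 			flag += chr(c)
-- 			c = 0
-- 			counter = 0
-- 	flag += "C"
-- 	return flag[::-1]
-- ===== SOURCE B (Python) =====
-- def val_to_string(target):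
--     n = target.bit_length() // 8
--     return "C" + "".join(chr((target >> (8 * i)) & 0xFF) for i in range(n - 1, -1, -1))
-- ===== Notes on version B (the rewrite author's own statement) =====
-- stated objective: simpler
-- what changed: Replaces the bit-by-bit accumulation loop with byte reversal by a closed-form byte count (bit_length()//8) and direct shift-and-mask extraction of whole bytes from most to least significant.
import Mathlib
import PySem

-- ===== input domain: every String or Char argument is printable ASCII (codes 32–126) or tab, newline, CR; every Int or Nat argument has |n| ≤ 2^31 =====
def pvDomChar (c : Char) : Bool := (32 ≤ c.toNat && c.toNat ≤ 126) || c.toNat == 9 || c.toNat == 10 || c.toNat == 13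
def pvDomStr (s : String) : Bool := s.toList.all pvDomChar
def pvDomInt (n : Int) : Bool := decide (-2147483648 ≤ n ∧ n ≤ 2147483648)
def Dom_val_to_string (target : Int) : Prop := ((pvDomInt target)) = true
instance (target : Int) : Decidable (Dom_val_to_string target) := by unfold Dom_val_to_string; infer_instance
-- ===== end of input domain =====

-- B replaces A's bit-by-bit accumulate-then-reverse loop with a closed-form byte count
-- (bit_length // 8) and direct shift-and-mask extraction of whole bytes (objective: simpler).

-- ===== PORT A =====
-- the while loop; Python's flag string is ported as a List Char (exact: built only by appending chars)
def vtsLoop (target : Int) (counter : Int) (c : Int) (flag : List Char) : List Char :=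
  if target = 0 then flag
  else if target < 0 then flag  -- totality guard: Python diverges here (excluded by Pre_)
  else
    let bi : List Int := [1, 2, 4, 8, 16, 32, 64, 128]
    let c' := c + PySem.Int.mod target 2 * PySem.List.pyGetD bi counter 0
    let counter' := counter + 1
    let target' := PySem.Int.floordiv target 2
    if counter' = 8 then vtsLoop target' 0 0 (flag ++ [Char.ofNat c'.toNat])
    else vtsLoop target' counter' c' flag
termination_by target.toNat
decreasing_by
  all_goals
    rw [PySem.Int.floordiv_eq_ediv_of_pos (by omega : (0:Int) < 2)]
    omega

def val_to_string (target : Int) : String :=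
  -- flag += "C"; return flag[::-1]
  String.mk ((PySem.List.slice? (vtsLoop target 0 0 [] ++ ['C']) none none (-1)).getD [])

-- ===== PORT B =====
def val_to_string_alt (target : Int) : String :=
  let n : Int := PySem.Int.floordiv (PySem.Int.bitLength target : Int) 8
  -- chr((target >> (8*i)) & 0xFF); the shift count (8*i).toNat is exact since every i in
  -- range(n-1, -1, -1) is nonnegative
  String.mk ('C' :: (PySem.List.pyRange (n - 1) (-1) (-1)).map
    (fun i => Char.ofNat (PySem.Int.band (target >>> (8 * i).toNat) 255).toNat))

-- ===== PRECONDITION & SPEC =====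
-- Pre_ excludes negative targets: there A's loop never terminates (target //= 2 stays at -1).
def Pre_val_to_string (target : Int) : Prop := 0 ≤ target
instance (target : Int) : Decidable (Pre_val_to_string target) := by
  unfold Pre_val_to_string; infer_instance
def pvWitness_val_to_string : Int := (300)

def Spec_val_to_string (target : Int) (out : String) : Prop := out = val_to_string_alt target
instance (target : Int) (out : String) : Decidable (Spec_val_to_string target out) := by
  unfold Spec_val_to_string; infer_instance

-- ===== CLAIM (what is proved, stated in full; the proofs are below) =====
def Claim_equal_val_to_string : Prop :=
  ∀ (target : Int), Dom_val_to_string target → Pre_val_to_string target →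
    Spec_val_to_string target (val_to_string target)

-- ===== LEMMAS AND PROOFS =====

-- residual output of A's loop from a state (counter = k, accumulated byte c, remaining value t)
def res (k : Nat) (c : Nat) (t : Nat) : List Char :=
  if k < 8 ∧ 2 ^ (7 - k) ≤ t then
    Char.ofNat (c + t % 2 ^ (8 - k) * 2 ^ k) :: res 0 0 (t / 2 ^ (8 - k))
  else []
termination_by t
decreasing_by
  rename_i h
  have h8 : 2 ≤ 2 ^ (8 - k) := by
    have h1 : 1 ≤ 8 - k := by omega
    calc 2 = 2 ^ 1 := rfl
    _ ≤ 2 ^ (8 - k) := Nat.pow_le_pow_right (by omega) h1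
  have h1 : 1 ≤ t := le_trans Nat.one_le_two_pow h.2
  exact Nat.div_lt_self (by omega) (by omega)

-- one non-flushing iteration of the loop, seen on the residual output
theorem res_step (k c t : Nat) (hk : k < 7) :
    res k c t = res (k + 1) (c + t % 2 * 2 ^ k) (t / 2) := by
  conv_lhs => rw [res]
  conv_rhs => rw [res]
  interval_cases k <;> norm_num <;> split_ifs with h1 h2 <;>
    first
      | rfl
      | (congr 2 <;> omega)

theorem loop_res : ∀ (t k c : Nat), k < 8 → c < 2 ^ k → ∀ (flag : List Char),
    vtsLoop (t : Int) (k : Int) (c : Int) flag = flag ++ res k c t := by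
  intro t
  induction t using Nat.strong_induction_on with
  | _ t ih =>
    intro k c hk hc flag
    have hmod : PySem.Int.mod (t : Int) 2 = ((t % 2 : Nat) : Int) := by
      exact_mod_cast PySem.Int.mod_natCast t 2
    have hdiv : PySem.Int.floordiv (t : Int) 2 = ((t / 2 : Nat) : Int) := by
      exact_mod_cast PySem.Int.floordiv_natCast t 2
    by_cases ht : t = 0
    · subst ht
      rw [vtsLoop]
      simp [res]
    · have htpos : 0 < t := Nat.pos_of_ne_zero ht
      rw [vtsLoop, if_neg (by exact_mod_cast ht), if_neg (by push_cast; omega), hmod, hdiv]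
      by_cases hk7 : k = 7
      · rw [if_pos (by push_cast; omega)]
        have hbi : PySem.List.pyGetD ([1, 2, 4, 8, 16, 32, 64, 128] : List Int) ((k : Nat) : Int) 0
            = (128 : Int) := by
          rw [hk7]; decide
        simp only [hbi]
        have hcast : ((c : Int) + ((t % 2 : Nat) : Int) * 128).toNat = c + t % 2 * 128 := by omega
        rw [hcast]
        have := ih (t / 2) (Nat.div_lt_self htpos one_lt_two) 0 0 (by omega) (by omega)
          (flag ++ [Char.ofNat (c + t % 2 * 128)])
        push_cast at this ⊢
        rw [this]
        subst hk7
        conv_rhs => rw [res]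
        rw [if_pos (by constructor <;> omega)]
        simp
      · have hk6 : k < 7 := by omega
        rw [if_neg (by push_cast; omega)]
        have hbi : PySem.List.pyGetD [1, 2, 4, 8, 16, 32, 64, 128] ((k : Nat) : Int) 0
            = ((2 ^ k : Nat) : Int) := by
          interval_cases k <;> decide
        simp only [hbi]
        have := ih (t / 2) (Nat.div_lt_self htpos one_lt_two) (k + 1) (c + t % 2 * 2 ^ k)
          (by omega)
          (by
            have h2 : t % 2 ≤ 1 := by omega
            have : c + t % 2 * 2 ^ k < 2 ^ k + 2 ^ k :=
              Nat.add_lt_add_of_lt_of_le hc (by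
                calc t % 2 * 2 ^ k ≤ 1 * 2 ^ k := Nat.mul_le_mul_right _ h2
                _ = 2 ^ k := by ring)
            calc c + t % 2 * 2 ^ k < 2 ^ k + 2 ^ k := this
            _ = 2 ^ (k + 1) := by ring)
          flag
        push_cast at this ⊢
        rw [this, ← res_step k c t hk6]

-- Python's bit_length of a Nat below 128 is at most 7
theorem bl_le7 (t : Nat) (h : t < 128) : PySem.Int.bitLength (t : Int) ≤ 7 := by
  by_cases ht : t = 0
  · subst ht; norm_num [PySem.Int.bitLength_zero]
  · by_contra hgt
    have h1 := PySem.Int.two_pow_bitLength_le (t : Int) (by exact_mod_cast ht)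
    rw [Int.natAbs_natCast] at h1
    have h2 : (2 : Nat) ^ 7 ≤ 2 ^ (PySem.Int.bitLength (t : Int) - 1) :=
      Nat.pow_le_pow_right (by omega) (by omega)
    omega

-- dividing out one full byte lowers bit_length by exactly 8
theorem bl_div256 (t : Nat) (h : 128 ≤ t) :
    PySem.Int.bitLength (t : Int) = PySem.Int.bitLength ((t / 256 : Nat) : Int) + 8 := by
  have e1 : t / 2 / 2 = t / 4 := by omega
  have e2 : t / 4 / 2 = t / 8 := by omega
  have e3 : t / 8 / 2 = t / 16 := by omega
  have e4 : t / 16 / 2 = t / 32 := by omega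
  have e5 : t / 32 / 2 = t / 64 := by omega
  have e6 : t / 64 / 2 = t / 128 := by omega
  have e7 : t / 128 / 2 = t / 256 := by omega
  rw [PySem.Int.bitLength_natCast (by omega : 0 < t),
    PySem.Int.bitLength_natCast (by omega : 0 < t / 2), e1,
    PySem.Int.bitLength_natCast (by omega : 0 < t / 4), e2,
    PySem.Int.bitLength_natCast (by omega : 0 < t / 8), e3,
    PySem.Int.bitLength_natCast (by omega : 0 < t / 16), e4,
    PySem.Int.bitLength_natCast (by omega : 0 < t / 32), e5,
    PySem.Int.bitLength_natCast (by omega : 0 < t / 64), e6,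
    PySem.Int.bitLength_natCast (by omega : 0 < t / 128), e7]

-- A's byte list in closed form: one byte per index below bit_length // 8, big shift first reversed
theorem res_eq_map : ∀ t : Nat,
    res 0 0 t = (List.range (PySem.Int.bitLength (t : Int) / 8)).map
      (fun i => Char.ofNat (t >>> (8 * i) % 256)) := by
  intro t
  induction t using Nat.strong_induction_on with
  | _ t ih =>
    by_cases h : t < 128
    · have hbl : PySem.Int.bitLength (t : Int) / 8 = 0 := by
        have := bl_le7 t h
        omega
      rw [res, hbl]
      simp
      omega
    · have h128 : 128 ≤ t := by omega
      rw [res, if_pos (by norm_num; omega)]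
      norm_num
      rw [ih (t / 256) (by omega), bl_div256 t h128]
      have hsucc : (PySem.Int.bitLength ((t / 256 : Nat) : Int) + 8) / 8
          = PySem.Int.bitLength ((t / 256 : Nat) : Int) / 8 + 1 := by omega
      rw [hsucc, List.range_succ_eq_map, List.map_cons, List.map_map]
      have hhead : Char.ofNat (t >>> (8 * 0) % 256) = Char.ofNat (t % 256) := by
        rw [Nat.shiftRight_eq_div_pow]
        norm_num
      rw [hhead]
      congr 1
      refine List.map_congr_left (fun i _ => ?_)
      simp only [Function.comp]
      congr 1
      have h8i : 8 * Nat.succ i = 8 + 8 * i := by omega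
      rw [h8i, Nat.shiftRight_add]
      congr 2
      rw [Nat.shiftRight_eq_div_pow]

theorem reverse_range_map (n : Nat) :
    (List.range n).reverse = (List.range n).map (fun k => n - 1 - k) := by
  induction n with
  | zero => simp
  | succ n ih =>
    conv_rhs => rw [List.range_succ_eq_map]
    rw [List.range_succ, List.reverse_append, ih]
    simp [List.map_map]
    intro k _
    omega

-- ===== VERDICT (by name: the statement is the Claim_ definition above) =====
theorem val_to_string_spec : Claim_equal_val_to_string := by
  unfold Claim_equal_val_to_string Spec_val_to_string Pre_val_to_string
  intro target _ hpre
  obtain ⟨t, rfl⟩ : ∃ t : Nat, target = (t : Int) :=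
    ⟨target.toNat, (Int.toNat_of_nonneg hpre).symm⟩
  unfold val_to_string val_to_string_alt
  rw [PySem.List.slice?_none_none_neg_one, Option.getD_some]
  have hA := loop_res t 0 0 (by omega) (by omega) []
  push_cast at hA
  rw [hA, res_eq_map t]
  dsimp only
  have hn : PySem.Int.floordiv ((PySem.Int.bitLength (t : Int) : Nat) : Int) 8
      = ((PySem.Int.bitLength (t : Int) / 8 : Nat) : Int) := by
    exact_mod_cast PySem.Int.floordiv_natCast (PySem.Int.bitLength (t : Int)) 8
  rw [hn]
  set n : Nat := PySem.Int.bitLength (t : Int) / 8 with hdefn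
  rw [PySem.List.pyRange_neg_one]
  have hcount : (((n : Int) - 1) - (-1)).toNat = n := by omega
  rw [hcount, List.map_map, List.nil_append, List.reverse_append, List.reverse_singleton]
  simp only [List.singleton_append]
  congr 1
  rw [← List.map_reverse, reverse_range_map, List.map_map]
  congr 1
  refine List.map_congr_left (fun k hk => ?_)
  simp only [Function.comp]
  have hk' : k < n := List.mem_range.mp hk
  have hsh : ((8 : Int) * ((n : Int) - 1 - (k : Int))).toNat = 8 * (n - 1 - k) := by omega
  rw [hsh, Int.shiftRight_natCast t (8 * (n - 1 - k)),
    PySem.Int.band_of_nonneg (by positivity) (by norm_num)]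
  congr 1
  have h255 : ((255 : Int)).toNat = 255 := rfl
  rw [Int.toNat_natCast, Int.toNat_natCast, h255]
  have := Nat.and_two_pow_sub_one_eq_mod (t >>> (8 * (n - 1 - k))) 8
  norm_num at this
  omega
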